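-- pv_equiv track=rewrite | github.com/MrBrantCode/unitest_baseline | mut_generate/mist_train_cf/cf_89898/solution.py | entrance
-- ===== SOURCE A (Python) =====
-- def entrance(word):
--     vowels = "aeiou"
--
--     # Check if the word has at least 6 characters
--     if len(word) < 6:
--         return -1
--
--     # Check if the word starts or ends with a vowel
--     if word[0] in vowels or word[-1] in vowels:
--         return -1
--
--     # Check if the word contains consecutive vowels
--     for i in range(len(word) - 1):
--         if word[i] in vowels and word[i + 1] in vowels:
--             return -1
--
--     # Count the number of vowels in the word
--     count = 0
--     for char in word:
--         if char in vowels: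
--             count += 1
--
--     return count
-- ===== SOURCE B (Python) =====
-- def entrance(word):
--     if len(word) < 6:
--         return -1
--     vowels = "aeiou"
--     count = 0
--     prev = True  # a virtual vowel before the start forbids a leading vowel
--     for ch in word:
--         cur = ch in vowels
--         if prev and cur:
--             return -1
--         if cur:
--             count += 1
--         prev = cur
--     # prev still True here means the last character was a vowel
--     return -1 if prev else count
-- ===== Notes on version B (the rewrite author's own statement) =====
-- stated objective: simpler
-- what changed: Replaced A's three separate scans (endpoint checks, consecutive-vowel index loop, counting loop) by one single left-to-right pass carrying a prev-is-vowel flag (seeded True so a leading vowel, a vowel pair, or a trailing vowel all fall out of the same flag) and a running count.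
import Mathlib
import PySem

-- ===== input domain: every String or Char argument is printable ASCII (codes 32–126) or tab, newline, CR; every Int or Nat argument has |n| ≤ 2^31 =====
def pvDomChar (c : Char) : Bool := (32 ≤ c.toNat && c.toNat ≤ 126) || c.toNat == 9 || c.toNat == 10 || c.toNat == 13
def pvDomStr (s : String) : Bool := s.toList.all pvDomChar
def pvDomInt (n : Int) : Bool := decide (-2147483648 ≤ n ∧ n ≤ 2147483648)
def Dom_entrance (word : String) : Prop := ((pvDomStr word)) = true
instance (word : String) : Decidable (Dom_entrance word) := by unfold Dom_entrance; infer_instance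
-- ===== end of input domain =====

-- B fuses A's three scans (endpoint checks, consecutive-vowel loop, counting loop) into one
-- pass with a prev-is-vowel flag; objective: simpler. A is total on strings, no Pre_ needed.

-- ===== PORT A =====
-- 'c in vowels' with a one-character string c: substring membership
def isVowel (c : Char) : Bool := PySem.Chars.isIn [c] "aeiou".toList

-- 'for i in range(len(word)-1): if word[i] in vowels and word[i+1] in vowels: return -1'
-- (indices produced by the range are always in bounds, so pyGetD's default is never read)
def entA_consec (cs : List Char) : List Int → Bool
  | [] => false
  | i :: is =>
    if isVowel (PySem.List.pyGetD cs i ' ') && isVowel (PySem.List.pyGetD cs (i + 1) ' ') then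
      true
    else entA_consec cs is

-- 'count = 0; for char in word: if char in vowels: count += 1'
def entA_count (cs : List Char) (count : Int) : Int :=
  match cs with
  | [] => count
  | c :: rest => entA_count rest (if isVowel c then count + 1 else count)

def entrance (word : String) : Int :=
  let cs := word.toList
  if PySem.Str.len word < 6 then -1
  -- word[0] / word[-1]: in bounds because len ≥ 6 here, so pyGetD is exact
  else if isVowel (PySem.List.pyGetD cs 0 ' ') || isVowel (PySem.List.pyGetD cs (-1) ' ') then -1
  else if entA_consec cs (PySem.List.pyRange 0 (PySem.Str.len word - 1) 1) then -1
  else entA_count cs 0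

-- ===== PORT B =====
-- single pass: prev = was the previous character a vowel (seeded True)
def entB_go : List Char → Bool → Int → Int
  | [], prev, count => if prev then -1 else count
  | c :: rest, prev, count =>
    let cur := isVowel c
    if prev && cur then -1
    else entB_go rest cur (if cur then count + 1 else count)

def entrance_alt (word : String) : Int :=
  if PySem.Str.len word < 6 then -1
  else entB_go word.toList true 0

-- ===== PRECONDITION & SPEC =====
def Spec_entrance (word : String) (out : Int) : Prop := out = entrance_alt word
instance (word : String) (out : Int) : Decidable (Spec_entrance word out) := by unfold Spec_entrance; infer_instance

-- ===== CLAIM (what is proved, stated in full; the proofs are below) =====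
def Claim_equal_entrance : Prop := ∀ (word : String), Dom_entrance word → Spec_entrance word (entrance word)

-- ===== LEMMAS AND PROOFS =====

-- consecutive vowels somewhere in the list (structural view of A's index loop)
def consecV : List Char → Bool
  | a :: b :: t => (isVowel a && isVowel b) || consecV (b :: t)
  | _ => false

-- what B's pass returns -1 for when entered with prev = false: a vowel pair or a trailing vowel
def badF : List Char → Bool
  | [] => false
  | [c] => isVowel c
  | a :: b :: t => (isVowel a && isVowel b) || badF (b :: t)

-- same, entered with prev = true: additionally a leading vowel (empty list counts as bad)
def badT : List Char → Bool
  | [] => true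
  | c :: rest => isVowel c || badF rest

def cv : List Char → Int
  | [] => 0
  | c :: t => (if isVowel c then 1 else 0) + cv t

lemma or_badF (b : Char) (t : List Char) :
    (isVowel b || badF (b :: t)) = (isVowel b || badF t) := by
  cases t <;> cases h : isVowel b <;> simp [badF, h]

lemma badF_cons (c : Char) (rest : List Char) :
    badF (c :: rest) = if isVowel c then badT rest else badF rest := by
  cases rest with
  | nil => cases h : isVowel c <;> simp [badF, badT, h]
  | cons b t => cases h : isVowel c <;> simp [badF, badT, h, or_badF]

lemma entB_go_char (cs : List Char) : ∀ count : Int,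
    entB_go cs true count = (if badT cs then -1 else count + cv cs) ∧
    entB_go cs false count = (if badF cs then -1 else count + cv cs) := by
  induction cs with
  | nil => intro count; simp [entB_go, badT, badF, cv]
  | cons c rest ih =>
    intro count
    constructor
    · cases h : isVowel c with
      | true => simp [entB_go, badT, h]
      | false =>
        have h2 := (ih count).2
        simp [entB_go, h, h2, badT, cv]
    · cases h : isVowel c with
      | true =>
        have h1 := (ih (count + 1)).1
        simp only [entB_go, h, Bool.false_and, Bool.false_eq_true, if_false, if_true]
        rw [h1, badF_cons, h]
        simp only [cv, h, if_true]
        split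
        · rfl
        · ring
      | false =>
        have h2 := (ih count).2
        simp [entB_go, h, h2, badF_cons, cv]

lemma entA_count_eq (cs : List Char) : ∀ count : Int, entA_count cs count = count + cv cs := by
  induction cs with
  | nil => intro count; simp [entA_count, cv]
  | cons c rest ih =>
    intro count
    cases h : isVowel c
    · simp [entA_count, h, ih, cv]
    · simp [entA_count, h, ih, cv]; ring

lemma entA_consec_eq (cs : List Char) : ∀ (n k : Nat), k + n = cs.length →
    entA_consec cs (PySem.List.pyRange k ((cs.length : Int) - 1) 1) = consecV (cs.drop k) := by
  intro n
  induction n with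
  | zero =>
    intro k hk
    rw [PySem.List.pyRange_one_eq_nil (by omega)]
    have hd : cs.drop k = [] := List.drop_eq_nil_of_le (by omega)
    rw [hd]
    rfl
  | succ n ih =>
    intro k hk
    by_cases hlt : (k : Int) < (cs.length : Int) - 1
    · have hk1 : k < cs.length := by omega
      have hk2 : k + 1 < cs.length := by omega
      rw [PySem.List.pyRange_one_cons hlt]
      have g1 : PySem.List.pyGetD cs (k : Int) ' ' = cs[k] := by
        rw [PySem.List.pyGetD_natCast]
        simp [List.getD_eq_getElem?_getD, hk1]
      have g2 : PySem.List.pyGetD cs ((k : Int) + 1) ' ' = cs[k + 1] := by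
        rw [show ((k : Int) + 1) = (((k + 1 : Nat)) : Int) by push_cast; ring,
          PySem.List.pyGetD_natCast]
        simp [List.getD_eq_getElem?_getD, hk2]
      have ihr := ih (k + 1) (by omega)
      rw [List.drop_eq_getElem_cons hk2] at ihr
      rw [List.drop_eq_getElem_cons hk1, List.drop_eq_getElem_cons hk2]
      simp only [entA_consec, g1, g2]
      rw [show ((k : Int) + 1) = (((k + 1 : Nat)) : Int) by push_cast; ring, ihr]
      cases hv : (isVowel cs[k] && isVowel cs[k + 1]) <;> simp [consecV, hv]
    · rw [PySem.List.pyRange_one_eq_nil (by omega)]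
      rcases hd : cs.drop k with _ | ⟨a, t⟩
      · rfl
      · have ht : t = [] := by
          have hl := congrArg List.length hd
          simp [List.length_drop] at hl
          cases t
          · rfl
          · simp at hl; omega
        subst ht
        rfl

lemma badF_eq (a : Char) (t : List Char) :
    badF (a :: t) = (consecV (a :: t) || isVowel ((a :: t).getLast (by simp))) := by
  induction t generalizing a with
  | nil => simp [badF, consecV]
  | cons b t ih =>
    rw [show (a :: b :: t).getLast (by simp) = (b :: t).getLast (by simp) from
      List.getLast_cons _]
    simp [badF, consecV, ih b, Bool.or_assoc]

theorem entrance_eq_alt (word : String) : entrance word = entrance_alt word := by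
  unfold entrance entrance_alt
  simp only [PySem.Str.len_eq]
  by_cases hlen : ((word.toList.length : Int)) < 6
  · rw [if_pos hlen, if_pos hlen]
  · rw [if_neg hlen, if_neg hlen]
    have hlen' : 6 ≤ word.toList.length := by omega
    obtain ⟨c, rest, hcs⟩ : ∃ c rest, word.toList = c :: rest := by
      cases h : word.toList with
      | nil => rw [h] at hlen'; simp at hlen'
      | cons c rest => exact ⟨c, rest, rfl⟩
    rw [hcs] at hlen'
    have hrest : rest ≠ [] := by
      intro h; rw [h] at hlen'; simp at hlen'
    simp only [hcs]
    rw [(entB_go_char (c :: rest) 0).1]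
    have hA0 : PySem.List.pyGetD (c :: rest) 0 ' ' = c := PySem.List.pyGetD_zero_cons ..
    have hA1 := PySem.List.pyGetD_neg_one (c :: rest) ' ' (by simp)
    have hcons : entA_consec (c :: rest)
        (PySem.List.pyRange 0 (((c :: rest).length : Int) - 1) 1) = consecV (c :: rest) := by
      have h0 := entA_consec_eq (c :: rest) (c :: rest).length 0 (by omega)
      simpa using h0
    rw [hA0, hA1, hcons, entA_count_eq]
    rw [show badT (c :: rest) = (isVowel c || badF rest) from rfl]
    rcases hr : rest with _ | ⟨b, t⟩
    · exact absurd hr hrest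
    · rw [badF_eq b t]
      rw [show ((c :: b :: t).getLast (by simp)) = ((b :: t).getLast (by simp)) from
        List.getLast_cons _]
      cases hc : isVowel c with
      | true => simp
      | false =>
        cases hlast : isVowel ((b :: t).getLast (by simp)) with
        | true => simp
        | false =>
          simp only [Bool.or_false, Bool.false_or]
          rw [show consecV (c :: b :: t) = ((isVowel c && isVowel b) || consecV (b :: t))
            from rfl, hc]
          simp

-- ===== VERDICT (by name: the statement is the Claim_ definition above) =====
theorem entrance_spec : Claim_equal_entrance := by
  intro word _
  unfold Spec_entrance
  exact entrance_eq_alt word
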